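-- pv_equiv track=rewrite | github.com/bakermo/aoc-py | puzzles/2024/04/solution.py | get_diagonals
-- ===== SOURCE A (Python) =====
-- from collections.abc import Sequence
--
-- def get_diagonals(grid: Sequence[Sequence[str]], diagonal_length):
--     diagonals_safety_bound = diagonal_length - 1
--     diagonals = []
--     rows = len(grid)
--     cols = len(grid[0])
--     for row in range(0, rows):
--         for col in range(0, cols):
--             if row + diagonals_safety_bound < rows and col + diagonals_safety_bound < cols:
--                 diagonal = ''
--                 for k in range(0, diagonal_length):
--                     diagonal += grid[row + k][col + k]
--                 diagonals.append(diagonal)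
--             if row + diagonals_safety_bound < rows and col - diagonals_safety_bound >= 0:
--                 diagonal = ''
--                 for k in range(0, diagonal_length):
--                     diagonal += grid[row + k][col - k]
--                 diagonals.append(diagonal)
--     return diagonals
-- ===== SOURCE B (Python) =====
-- def get_diagonals(grid, diagonal_length):
--     rows = len(grid)
--     cols = len(grid[0])
--     # number of cells each diagonal window takes (negative lengths take nothing)
--     n = diagonal_length if diagonal_length > 0 else 0
--     # precompute every full down-right diagonal (key row-col) as a list of cells
--     diag_dr = {}
--     for d in range(-(cols - 1), rows):
--         r, c = (d, 0) if d >= 0 else (0, -d)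
--         cells = []
--         while r < rows and c < cols:
--             cells.append(grid[r][c])
--             r += 1
--             c += 1
--         diag_dr[d] = cells
--     # precompute every full down-left diagonal (key row+col) as a list of cells
--     diag_dl = {}
--     for s in range(0, rows + cols - 1):
--         r, c = (0, s) if s < cols else (s - cols + 1, cols - 1)
--         cells = []
--         while r < rows and c >= 0:
--             cells.append(grid[r][c])
--             r += 1
--             c -= 1
--         diag_dl[s] = cells
--     out = []
--     bound = diagonal_length - 1
--     for row in range(0, rows):
--         for col in range(0, cols):
--             if row + bound < rows and col + bound < cols:
--                 off = min(row, col)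
--                 out.append(''.join(diag_dr[row - col][off:off + n]))
--             if row + bound < rows and col - bound >= 0:
--                 off = min(row, cols - 1 - col)
--                 out.append(''.join(diag_dl[row + col][off:off + n]))
--     return out
-- ===== Notes on version B (the rewrite author's own statement) =====
-- stated objective: alternative
-- what changed: Instead of re-walking cells in an inner per-window loop, B precomputes every full down-right/down-left diagonal once as a dict of cell lists keyed by row-col / row+col, and each window becomes an offset slice plus join of its precomputed diagonal.
-- outside the precondition, e.g. on get_diagonals([['a', 'b'], ['c']], 0): A returns ['', '', '', '', '', '', '', ''], B raises IndexError
import Mathlib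
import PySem

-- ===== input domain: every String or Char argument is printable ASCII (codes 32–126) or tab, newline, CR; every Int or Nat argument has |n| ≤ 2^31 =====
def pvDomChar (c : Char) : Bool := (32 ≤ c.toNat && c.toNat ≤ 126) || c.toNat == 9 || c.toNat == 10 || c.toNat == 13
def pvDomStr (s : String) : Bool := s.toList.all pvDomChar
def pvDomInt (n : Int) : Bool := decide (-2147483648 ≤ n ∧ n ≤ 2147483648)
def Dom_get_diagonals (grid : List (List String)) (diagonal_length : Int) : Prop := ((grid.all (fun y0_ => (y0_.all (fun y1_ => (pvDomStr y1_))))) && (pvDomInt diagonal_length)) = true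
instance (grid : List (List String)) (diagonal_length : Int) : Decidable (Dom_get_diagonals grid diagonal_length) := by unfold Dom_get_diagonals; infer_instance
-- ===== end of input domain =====

-- B replaces A's per-window inner character loop by precomputed full diagonals
-- (keyed by row-col / row+col) that each window slices and joins; return values agree on Pre_.

-- ===== PORT A =====
def get_diagonals (grid : List (List String)) (diagonal_length : Int) : List String :=
  let diagonals_safety_bound := diagonal_length - 1
  let rows : Int := grid.length
  let cols : Int := (PySem.List.pyGetD grid 0 ([] : List String)).length
  (PySem.List.pyRange 0 rows 1).foldl (fun diagonals row =>
    (PySem.List.pyRange 0 cols 1).foldl (fun diagonals col =>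
      let diagonals :=
        if row + diagonals_safety_bound < rows ∧ col + diagonals_safety_bound < cols then
          diagonals ++ [(PySem.List.pyRange 0 diagonal_length 1).foldl
            (fun diagonal k =>
              diagonal ++ PySem.List.pyGetD (PySem.List.pyGetD grid (row + k) []) (col + k) "") ""]
        else diagonals
      if row + diagonals_safety_bound < rows ∧ col - diagonals_safety_bound ≥ 0 then
        diagonals ++ [(PySem.List.pyRange 0 diagonal_length 1).foldl
          (fun diagonal k =>
            diagonal ++ PySem.List.pyGetD (PySem.List.pyGetD grid (row + k) []) (col - k) "") ""]
      else diagonals) diagonals) []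

-- ===== PORT B =====
-- the `while r < rows and c < cols:` cell-collecting loop of Source B (down-right diagonal walk)
def pvWalkDR (grid : List (List String)) (rows cols : Int) (r c : Int) : List String :=
  if _h : r < rows ∧ c < cols then
    PySem.List.pyGetD (PySem.List.pyGetD grid r []) c "" :: pvWalkDR grid rows cols (r + 1) (c + 1)
  else []
termination_by (rows - r).toNat
decreasing_by omega

-- the `while r < rows and c >= 0:` cell-collecting loop of Source B (down-left diagonal walk)
def pvWalkDL (grid : List (List String)) (rows : Int) (r c : Int) : List String :=
  if _h : r < rows ∧ c ≥ 0 then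
    PySem.List.pyGetD (PySem.List.pyGetD grid r []) c "" :: pvWalkDL grid rows (r + 1) (c - 1)
  else []
termination_by (rows - r).toNat
decreasing_by omega

def get_diagonals_alt (grid : List (List String)) (diagonal_length : Int) : List String :=
  let rows : Int := grid.length
  let cols : Int := (PySem.List.pyGetD grid 0 ([] : List String)).length
  let n := if diagonal_length > 0 then diagonal_length else 0
  let diag_dr : PySem.Dict Int (List String) :=
    (PySem.List.pyRange (-(cols - 1)) rows 1).foldl (fun dd d =>
      let rc : Int × Int := if d ≥ 0 then (d, 0) else (0, -d)
      dd.insert d (pvWalkDR grid rows cols rc.1 rc.2)) PySem.Dict.empty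
  let diag_dl : PySem.Dict Int (List String) :=
    (PySem.List.pyRange 0 (rows + cols - 1) 1).foldl (fun dd s =>
      let rc : Int × Int := if s < cols then (0, s) else (s - cols + 1, cols - 1)
      dd.insert s (pvWalkDL grid rows rc.1 rc.2)) PySem.Dict.empty
  let bound := diagonal_length - 1
  (PySem.List.pyRange 0 rows 1).foldl (fun out row =>
    (PySem.List.pyRange 0 cols 1).foldl (fun out col =>
      let out :=
        if row + bound < rows ∧ col + bound < cols then
          let off := min row col
          -- diag_dr[row - col] cannot miss its key here, so the KeyError default is never used
          out ++ [PySem.Str.join "" (PySem.List.slice ((diag_dr.get? (row - col)).getD [])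
            (some off) (some (off + n)))]
        else out
      if row + bound < rows ∧ col - bound ≥ 0 then
        let off := min row (cols - 1 - col)
        out ++ [PySem.Str.join "" (PySem.List.slice ((diag_dl.get? (row + col)).getD [])
          (some off) (some (off + n)))]
      else out) out) []

-- ===== PRECONDITION & SPEC =====
-- Pre_ excludes the empty grid (A raises IndexError on len(grid[0])) and ragged grids with a row
-- shorter than the first row: there A raises IndexError whenever a window touches a missing cell,
-- and B's own precompute pass raises IndexError even when A's windows happen to avoid the short rows.
def Pre_get_diagonals (grid : List (List String)) (diagonal_length : Int) : Prop :=
  grid ≠ [] ∧ ∀ row ∈ grid, grid.headI.length ≤ row.length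
instance (grid : List (List String)) (diagonal_length : Int) : Decidable (Pre_get_diagonals grid diagonal_length) := by unfold Pre_get_diagonals; infer_instance

def pvWitness_get_diagonals : List (List String) × Int := ([["a", "b"], ["c", "d"]], 2)

def Spec_get_diagonals (grid : List (List String)) (diagonal_length : Int) (out : List String) : Prop := out = get_diagonals_alt grid diagonal_length
instance (grid : List (List String)) (diagonal_length : Int) (out : List String) : Decidable (Spec_get_diagonals grid diagonal_length out) := by unfold Spec_get_diagonals; infer_instance

-- ===== CLAIM (what is proved, stated in full; the proofs are below) =====
def Claim_equal_get_diagonals : Prop := ∀ (grid : List (List String)) (diagonal_length : Int), Dom_get_diagonals grid diagonal_length → Pre_get_diagonals grid diagonal_length → Spec_get_diagonals grid diagonal_length (get_diagonals grid diagonal_length)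

-- ===== LEMMAS AND PROOFS =====

theorem pv_intercalate_nil {α : Type} (xs : List (List α)) :
    ([] : List α).intercalate xs = xs.flatten := by
  induction xs with
  | nil => rfl
  | cons x xs ih =>
    cases xs with
    | nil => simp [List.intercalate]
    | cons y ys => simp_all [List.intercalate, List.intersperse]

theorem pv_join_empty (l : List String) : PySem.Str.join "" l = l.foldl (· ++ ·) "" := by
  rw [PySem.Str.join]
  simp only [PySem.Chars.join, String.toList_empty, pv_intercalate_nil]
  induction l using List.reverseRecOn with
  | nil => rfl
  | append_singleton xs x ih =>
    simp only [List.map_append, List.flatten_append, List.foldl_append, List.foldl_cons,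
      List.foldl_nil, ← ih, List.map_cons, List.map_nil, List.flatten_cons, List.flatten_nil,
      List.append_nil, String.ofList_append, String.ofList_toList]

theorem pv_get?_foldl_insert {α : Type} (F : PySem.Dict Int α → Int → PySem.Dict Int α)
    (f : Int → α) (hF : ∀ dd d, F dd d = dd.insert d (f d)) (ds : List Int)
    (init : PySem.Dict Int α) (k : Int) (hk : k ∈ ds) :
    (ds.foldl F init).get? k = some (f k) := by
  induction ds using List.reverseRecOn generalizing init with
  | nil => cases hk
  | append_singleton ds d ih =>
    rw [List.foldl_append, List.foldl_cons, List.foldl_nil, hF]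
    by_cases h : k = d
    · subst h; rw [PySem.Dict.get?_insert_self]
    · rw [PySem.Dict.get?_insert_of_ne _ _ h]
      exact ih init (by simpa [h] using hk)

theorem pvWalkDR_drop (grid : List (List String)) (rows cols : Int) (m : Nat) :
    ∀ (r c : Int), (pvWalkDR grid rows cols r c).drop m = pvWalkDR grid rows cols (r + m) (c + m) := by
  induction m with
  | zero => intro r c; simp
  | succ m ih =>
    intro r c
    rw [pvWalkDR]
    by_cases h : r < rows ∧ c < cols
    · rw [dif_pos h, List.drop_succ_cons, ih (r + 1) (c + 1)]
      congr 1 <;> push_cast <;> ring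
    · rw [dif_neg h, List.drop_nil, pvWalkDR, dif_neg (by omega)]

theorem pvWalkDL_drop (grid : List (List String)) (rows : Int) (m : Nat) :
    ∀ (r c : Int), (pvWalkDL grid rows r c).drop m = pvWalkDL grid rows (r + m) (c - m) := by
  induction m with
  | zero => intro r c; simp
  | succ m ih =>
    intro r c
    rw [pvWalkDL]
    by_cases h : r < rows ∧ c ≥ 0
    · rw [dif_pos h, List.drop_succ_cons, ih (r + 1) (c - 1)]
      congr 1 <;> push_cast <;> ring
    · rw [dif_neg h, List.drop_nil, pvWalkDL, dif_neg (by omega)]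

theorem pvWalkDR_take (grid : List (List String)) (rows cols : Int) (m : Nat) :
    ∀ (r c : Int), r + m ≤ rows → c + m ≤ cols →
    (pvWalkDR grid rows cols r c).take m
      = (List.range m).map (fun (k : Nat) => PySem.List.pyGetD (PySem.List.pyGetD grid (r + (k : Int)) []) (c + (k : Int)) "") := by
  induction m with
  | zero => intro r c _ _; simp
  | succ m ih =>
    intro r c hr hc
    rw [pvWalkDR, dif_pos (by constructor <;> push_cast at hr hc <;> omega), List.take_succ_cons,
      List.range_succ_eq_map, List.map_cons, List.map_map]
    refine List.cons_eq_cons.mpr ⟨by norm_num, ?_⟩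
    rw [ih (r + 1) (c + 1) (by push_cast at hr ⊢; omega) (by push_cast at hc ⊢; omega)]
    apply List.map_congr_left
    intro k _
    simp only [Function.comp]
    push_cast
    ring_nf

theorem pvWalkDL_take (grid : List (List String)) (rows : Int) (m : Nat) :
    ∀ (r c : Int), r + m ≤ rows → (m : Int) ≤ c + 1 →
    (pvWalkDL grid rows r c).take m
      = (List.range m).map (fun (k : Nat) => PySem.List.pyGetD (PySem.List.pyGetD grid (r + (k : Int)) []) (c - (k : Int)) "") := by
  induction m with
  | zero => intro r c _ _; simp
  | succ m ih =>
    intro r c hr hc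
    rw [pvWalkDL, dif_pos (by constructor <;> push_cast at hr hc <;> omega), List.take_succ_cons,
      List.range_succ_eq_map, List.map_cons, List.map_map]
    refine List.cons_eq_cons.mpr ⟨by norm_num, ?_⟩
    rw [ih (r + 1) (c - 1) (by push_cast at hr ⊢; omega) (by push_cast at hc ⊢; omega)]
    apply List.map_congr_left
    intro k _
    simp only [Function.comp]
    push_cast
    ring_nf

theorem pv_main (grid : List (List String)) (dl : Int) :
    get_diagonals grid dl = get_diagonals_alt grid dl := by
  simp only [get_diagonals, get_diagonals_alt]
  set R : Int := (grid.length : Int) with hR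
  set C : Int := ((PySem.List.pyGetD grid 0 ([] : List String)).length : Int) with hC
  refine PySem.List.foldl_congr_mem _ _ _ _ ?_
  intro acc row hrow
  refine PySem.List.foldl_congr_mem _ _ _ _ ?_
  intro acc2 col hcol
  rw [PySem.List.mem_pyRange_one] at hrow hcol
  have hn : (0 : Int) ≤ (if dl > 0 then dl else 0) := by split_ifs <;> omega
  have hDR : row + (dl - 1) < R ∧ col + (dl - 1) < C →
      (PySem.List.pyRange 0 dl 1).foldl
        (fun diagonal k =>
          diagonal ++ PySem.List.pyGetD (PySem.List.pyGetD grid (row + k) []) (col + k) "") ""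
      = PySem.Str.join "" (PySem.List.slice
          ((((PySem.List.pyRange (-(C - 1)) R 1).foldl (fun dd d =>
              let rc : Int × Int := if d ≥ 0 then (d, 0) else (0, -d)
              dd.insert d (pvWalkDR grid R C rc.1 rc.2)) PySem.Dict.empty).get? (row - col)).getD [])
          (some (min row col)) (some (min row col + (if dl > 0 then dl else 0)))) := by
    rintro ⟨h1, h2⟩
    have hmem : row - col ∈ PySem.List.pyRange (-(C - 1)) R 1 := by
      rw [PySem.List.mem_pyRange_one]; omega
    rw [pv_get?_foldl_insert _
        (fun d => pvWalkDR grid R C (if d ≥ 0 then ((d, 0) : Int × Int) else (0, -d)).1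
          (if d ≥ 0 then ((d, 0) : Int × Int) else (0, -d)).2)
        (fun _ _ => rfl) _ _ _ hmem]
    have hstart : pvWalkDR grid R C (if row - col ≥ 0 then ((row - col, 0) : Int × Int) else (0, -(row - col))).1
        (if row - col ≥ 0 then ((row - col, 0) : Int × Int) else (0, -(row - col))).2
        = pvWalkDR grid R C (row - min row col) (col - min row col) := by
      by_cases hrc : row - col ≥ 0
      · rw [if_pos hrc]; congr 1 <;> simp <;> omega
      · rw [if_neg hrc]; congr 1 <;> simp <;> omega
    rw [Option.getD_some, hstart,
      PySem.List.slice_toNat _ (by omega) (by omega),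
      show ((min row col + (if dl > 0 then dl else 0)).toNat - (min row col).toNat)
        = (if dl > 0 then dl else 0).toNat by omega,
      pvWalkDR_drop,
      show row - min row col + ((min row col).toNat : Int) = row by omega,
      show col - min row col + ((min row col).toNat : Int) = col by omega]
    by_cases hdl : dl > 0
    · rw [if_pos hdl,
        pvWalkDR_take grid R C dl.toNat row col (by omega) (by omega),
        pv_join_empty, PySem.List.pyRange_one]
      simp only [List.foldl_map, Int.sub_zero, zero_add]
    · rw [if_neg hdl]
      rw [PySem.List.pyRange_one_eq_nil (by omega)]
      simp only [Int.toNat_zero, List.take_zero, List.foldl_nil]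
      decide
  have hDL : row + (dl - 1) < R ∧ col - (dl - 1) ≥ 0 →
      (PySem.List.pyRange 0 dl 1).foldl
        (fun diagonal k =>
          diagonal ++ PySem.List.pyGetD (PySem.List.pyGetD grid (row + k) []) (col - k) "") ""
      = PySem.Str.join "" (PySem.List.slice
          ((((PySem.List.pyRange 0 (R + C - 1) 1).foldl (fun dd s =>
              let rc : Int × Int := if s < C then (0, s) else (s - C + 1, C - 1)
              dd.insert s (pvWalkDL grid R rc.1 rc.2)) PySem.Dict.empty).get? (row + col)).getD [])
          (some (min row (C - 1 - col))) (some (min row (C - 1 - col) + (if dl > 0 then dl else 0)))) := by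
    rintro ⟨h1, h2⟩
    have hmem : row + col ∈ PySem.List.pyRange 0 (R + C - 1) 1 := by
      rw [PySem.List.mem_pyRange_one]; omega
    rw [pv_get?_foldl_insert _
        (fun s => pvWalkDL grid R (if s < C then ((0, s) : Int × Int) else (s - C + 1, C - 1)).1
          (if s < C then ((0, s) : Int × Int) else (s - C + 1, C - 1)).2)
        (fun _ _ => rfl) _ _ _ hmem]
    have hstart : pvWalkDL grid R (if row + col < C then ((0, row + col) : Int × Int) else (row + col - C + 1, C - 1)).1
        (if row + col < C then ((0, row + col) : Int × Int) else (row + col - C + 1, C - 1)).2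
        = pvWalkDL grid R (row - min row (C - 1 - col)) (col + min row (C - 1 - col)) := by
      by_cases hrc : row + col < C
      · rw [if_pos hrc]; congr 1 <;> simp <;> omega
      · rw [if_neg hrc]; congr 1 <;> simp <;> omega
    rw [Option.getD_some, hstart,
      PySem.List.slice_toNat _ (by omega) (by omega),
      show ((min row (C - 1 - col) + (if dl > 0 then dl else 0)).toNat - (min row (C - 1 - col)).toNat)
        = (if dl > 0 then dl else 0).toNat by omega,
      pvWalkDL_drop,
      show row - min row (C - 1 - col) + ((min row (C - 1 - col)).toNat : Int) = row by omega,
      show col + min row (C - 1 - col) - ((min row (C - 1 - col)).toNat : Int) = col by omega]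
    by_cases hdl : dl > 0
    · rw [if_pos hdl,
        pvWalkDL_take grid R dl.toNat row col (by omega) (by omega),
        pv_join_empty, PySem.List.pyRange_one]
      simp only [List.foldl_map, Int.sub_zero, zero_add]
    · rw [if_neg hdl]
      rw [PySem.List.pyRange_one_eq_nil (by omega)]
      simp only [Int.toNat_zero, List.take_zero, List.foldl_nil]
      decide
  by_cases ha : row + (dl - 1) < R ∧ col - (dl - 1) ≥ 0
  · rw [if_pos ha, if_pos ha, hDL ha]
    by_cases hb : row + (dl - 1) < R ∧ col + (dl - 1) < C
    · rw [if_pos hb, if_pos hb, hDR hb]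
    · rw [if_neg hb, if_neg hb]
  · rw [if_neg ha, if_neg ha]
    by_cases hb : row + (dl - 1) < R ∧ col + (dl - 1) < C
    · rw [if_pos hb, if_pos hb, hDR hb]
    · rw [if_neg hb, if_neg hb]

-- ===== VERDICT (by name: the statement is the Claim_ definition above) =====
theorem get_diagonals_spec : Claim_equal_get_diagonals := by
  intro grid dl _ _
  unfold Spec_get_diagonals
  exact pv_main grid dl
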